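-- pv_equiv track=rewrite | github.com/Logic06183/RP2 | rigorous_real_data_xai_analysis.py | _categorize_risk_factors
-- ===== SOURCE A (Python) =====
-- def _categorize_risk_factors(features):
--     """Categorize identified risk factors."""
--
--     categories = {
--         'Demographic': [],
--         'Biomarker': [],
--         'Geographic': [],
--         'Temporal': [],
--         'Clinical': []
--     }
--
--     for feature in features:
--         if any(demo in feature.lower() for demo in ['age', 'sex', 'race']):
--             categories['Demographic'].append(feature)
--         elif any(bio in feature.lower() for bio in ['composite', 'cell', 'viral', 'hemoglobin']):
--             categories['Biomarker'].append(feature)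
--         elif any(geo in feature.lower() for geo in ['latitude', 'longitude', 'distance']):
--             categories['Geographic'].append(feature)
--         elif any(temp in feature.lower() for temp in ['month', 'season', 'day']):
--             categories['Temporal'].append(feature)
--         else:
--             categories['Clinical'].append(feature)
--
--     # Remove empty categories
--     return {k: v for k, v in categories.items() if v}
-- ===== SOURCE B (Python) =====
-- _TABLE = [
--     ('Demographic', ['age', 'sex', 'race']),
--     ('Biomarker', ['composite', 'cell', 'viral', 'hemoglobin']),
--     ('Geographic', ['latitude', 'longitude', 'distance']),
--     ('Temporal', ['month', 'season', 'day']),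
-- ]
--
-- _CATEGORIES = ['Demographic', 'Biomarker', 'Geographic', 'Temporal', 'Clinical']
--
--
-- def _label(feature):
--     """First category in the priority table whose keyword occurs in the feature."""
--     fl = feature.lower()
--     return next((cat for cat, kws in _TABLE if any(k in fl for k in kws)), 'Clinical')
--
--
-- def _categorize_risk_factors(features):
--     """Categorize identified risk factors (group-by over a priority keyword table)."""
--     result = {}
--     for cat in _CATEGORIES:
--         group = [f for f in features if _label(f) == cat]
--         if group:
--             result[cat] = group
--     return result
-- ===== Notes on version B (the rewrite author's own statement) =====
-- stated objective: idiomatic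
-- what changed: Replaced the single pass with a five-way if/elif chain appending into a pre-built dict by a data-driven priority keyword table plus a group-by: each category's list is computed as a filter of the features whose first-matching table entry is that category, with Clinical as the fallback.
import Mathlib
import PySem

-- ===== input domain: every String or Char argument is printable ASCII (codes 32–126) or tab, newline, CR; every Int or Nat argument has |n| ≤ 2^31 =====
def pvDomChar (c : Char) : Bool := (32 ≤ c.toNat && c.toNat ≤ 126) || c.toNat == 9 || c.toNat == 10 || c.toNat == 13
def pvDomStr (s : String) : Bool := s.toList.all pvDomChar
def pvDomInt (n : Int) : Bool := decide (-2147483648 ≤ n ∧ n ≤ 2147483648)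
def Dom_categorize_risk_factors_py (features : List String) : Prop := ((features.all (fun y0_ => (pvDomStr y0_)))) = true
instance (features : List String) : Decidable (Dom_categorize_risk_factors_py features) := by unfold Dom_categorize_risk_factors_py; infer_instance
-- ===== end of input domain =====

-- B replaces A's if/elif chain with a priority keyword table and a per-category group-by (idiomatic; same cost).


-- ===== PORT A =====
-- one step of A's for-loop: the if/elif chain appending into the five category lists
def pvStepA (s : List String × List String × List String × List String × List String)
    (feature : String) :
    List String × List String × List String × List String × List String :=
  let fl := PySem.Str.lower feature
  if ["age", "sex", "race"].any (fun demo => PySem.Str.isIn demo fl) then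
    (s.1 ++ [feature], s.2.1, s.2.2.1, s.2.2.2.1, s.2.2.2.2)
  else if ["composite", "cell", "viral", "hemoglobin"].any (fun bio => PySem.Str.isIn bio fl) then
    (s.1, s.2.1 ++ [feature], s.2.2.1, s.2.2.2.1, s.2.2.2.2)
  else if ["latitude", "longitude", "distance"].any (fun geo => PySem.Str.isIn geo fl) then
    (s.1, s.2.1, s.2.2.1 ++ [feature], s.2.2.2.1, s.2.2.2.2)
  else if ["month", "season", "day"].any (fun temp => PySem.Str.isIn temp fl) then
    (s.1, s.2.1, s.2.2.1, s.2.2.2.1 ++ [feature], s.2.2.2.2)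
  else
    (s.1, s.2.1, s.2.2.1, s.2.2.2.1, s.2.2.2.2 ++ [feature])

def categorize_risk_factors_py (features : List String) : List (String × List String) :=
  let st := features.foldl pvStepA ([], [], [], [], [])
  ([("Demographic", st.1), ("Biomarker", st.2.1), ("Geographic", st.2.2.1),
    ("Temporal", st.2.2.2.1), ("Clinical", st.2.2.2.2)]).filter (fun p => !p.2.isEmpty)

-- ===== PORT B =====
def pvTableB : List (String × List String) :=
  [("Demographic", ["age", "sex", "race"]),
   ("Biomarker", ["composite", "cell", "viral", "hemoglobin"]),
   ("Geographic", ["latitude", "longitude", "distance"]),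
   ("Temporal", ["month", "season", "day"])]

def pvCategoriesB : List String :=
  ["Demographic", "Biomarker", "Geographic", "Temporal", "Clinical"]

-- first category in the priority table whose keyword occurs in the feature, else "Clinical"
def pvLabelB (feature : String) : String :=
  let fl := PySem.Str.lower feature
  ((pvTableB.find? (fun p => p.2.any (fun k => PySem.Str.isIn k fl))).map Prod.fst).getD "Clinical"

def categorize_risk_factors_py_alt (features : List String) : List (String × List String) :=
  (pvCategoriesB.map (fun cat => (cat, features.filter (fun f => pvLabelB f == cat)))).filter
    (fun p => !p.2.isEmpty)

-- ===== PRECONDITION & SPEC =====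
def Spec_categorize_risk_factors_py (features : List String) (out : List (String × List String)) : Prop := out = categorize_risk_factors_py_alt features
instance (features : List String) (out : List (String × List String)) : Decidable (Spec_categorize_risk_factors_py features out) := by unfold Spec_categorize_risk_factors_py; infer_instance

-- ===== CLAIM (what is proved, stated in full; the proofs are below) =====
def Claim_equal_categorize_risk_factors_py : Prop := ∀ (features : List String), Dom_categorize_risk_factors_py features → Spec_categorize_risk_factors_py features (categorize_risk_factors_py features)

-- ===== LEMMAS AND PROOFS =====

-- the four keyword tests of A's chain
def pvDemo (f : String) : Bool := ["age", "sex", "race"].any (fun d => PySem.Str.isIn d (PySem.Str.lower f))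
def pvBio (f : String) : Bool := ["composite", "cell", "viral", "hemoglobin"].any (fun d => PySem.Str.isIn d (PySem.Str.lower f))
def pvGeo (f : String) : Bool := ["latitude", "longitude", "distance"].any (fun d => PySem.Str.isIn d (PySem.Str.lower f))
def pvTemp (f : String) : Bool := ["month", "season", "day"].any (fun d => PySem.Str.isIn d (PySem.Str.lower f))

theorem label_demo (f : String) : (pvLabelB f == "Demographic") = pvDemo f := by
  simp only [pvLabelB, pvTableB, List.find?, pvDemo, pvBio, pvGeo, pvTemp]
  cases h1 : ["age", "sex", "race"].any (fun d => PySem.Str.isIn d (PySem.Str.lower f)) <;>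
  cases h2 : ["composite", "cell", "viral", "hemoglobin"].any (fun d => PySem.Str.isIn d (PySem.Str.lower f)) <;>
  cases h3 : ["latitude", "longitude", "distance"].any (fun d => PySem.Str.isIn d (PySem.Str.lower f)) <;>
  cases h4 : ["month", "season", "day"].any (fun d => PySem.Str.isIn d (PySem.Str.lower f)) <;>
  simp_all

theorem label_bio (f : String) : (pvLabelB f == "Biomarker") = (!pvDemo f && pvBio f) := by
  simp only [pvLabelB, pvTableB, List.find?, pvDemo, pvBio, pvGeo, pvTemp]
  cases h1 : ["age", "sex", "race"].any (fun d => PySem.Str.isIn d (PySem.Str.lower f)) <;>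
  cases h2 : ["composite", "cell", "viral", "hemoglobin"].any (fun d => PySem.Str.isIn d (PySem.Str.lower f)) <;>
  cases h3 : ["latitude", "longitude", "distance"].any (fun d => PySem.Str.isIn d (PySem.Str.lower f)) <;>
  cases h4 : ["month", "season", "day"].any (fun d => PySem.Str.isIn d (PySem.Str.lower f)) <;>
  simp_all

theorem label_geo (f : String) : (pvLabelB f == "Geographic") = (!pvDemo f && !pvBio f && pvGeo f) := by
  simp only [pvLabelB, pvTableB, List.find?, pvDemo, pvBio, pvGeo, pvTemp]
  cases h1 : ["age", "sex", "race"].any (fun d => PySem.Str.isIn d (PySem.Str.lower f)) <;>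
  cases h2 : ["composite", "cell", "viral", "hemoglobin"].any (fun d => PySem.Str.isIn d (PySem.Str.lower f)) <;>
  cases h3 : ["latitude", "longitude", "distance"].any (fun d => PySem.Str.isIn d (PySem.Str.lower f)) <;>
  cases h4 : ["month", "season", "day"].any (fun d => PySem.Str.isIn d (PySem.Str.lower f)) <;>
  simp_all

theorem label_temp (f : String) : (pvLabelB f == "Temporal") = (!pvDemo f && !pvBio f && !pvGeo f && pvTemp f) := by
  simp only [pvLabelB, pvTableB, List.find?, pvDemo, pvBio, pvGeo, pvTemp]
  cases h1 : ["age", "sex", "race"].any (fun d => PySem.Str.isIn d (PySem.Str.lower f)) <;>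
  cases h2 : ["composite", "cell", "viral", "hemoglobin"].any (fun d => PySem.Str.isIn d (PySem.Str.lower f)) <;>
  cases h3 : ["latitude", "longitude", "distance"].any (fun d => PySem.Str.isIn d (PySem.Str.lower f)) <;>
  cases h4 : ["month", "season", "day"].any (fun d => PySem.Str.isIn d (PySem.Str.lower f)) <;>
  simp_all

theorem label_clin (f : String) : (pvLabelB f == "Clinical") = (!pvDemo f && !pvBio f && !pvGeo f && !pvTemp f) := by
  simp only [pvLabelB, pvTableB, List.find?, pvDemo, pvBio, pvGeo, pvTemp]
  cases h1 : ["age", "sex", "race"].any (fun d => PySem.Str.isIn d (PySem.Str.lower f)) <;>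
  cases h2 : ["composite", "cell", "viral", "hemoglobin"].any (fun d => PySem.Str.isIn d (PySem.Str.lower f)) <;>
  cases h3 : ["latitude", "longitude", "distance"].any (fun d => PySem.Str.isIn d (PySem.Str.lower f)) <;>
  cases h4 : ["month", "season", "day"].any (fun d => PySem.Str.isIn d (PySem.Str.lower f)) <;>
  simp_all

-- A's fold computes the five filters (generalized over the accumulator)
theorem foldA_eq (features : List String)
    (a b c d e : List String) :
    features.foldl pvStepA (a, b, c, d, e) =
      (a ++ features.filter pvDemo,
       b ++ features.filter (fun f => !pvDemo f && pvBio f),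
       c ++ features.filter (fun f => !pvDemo f && !pvBio f && pvGeo f),
       d ++ features.filter (fun f => !pvDemo f && !pvBio f && !pvGeo f && pvTemp f),
       e ++ features.filter (fun f => !pvDemo f && !pvBio f && !pvGeo f && !pvTemp f)) := by
  induction features generalizing a b c d e with
  | nil => simp
  | cons x xs ih =>
    simp only [List.foldl_cons, pvStepA, List.filter_cons]
    cases h1 : pvDemo x <;> cases h2 : pvBio x <;> cases h3 : pvGeo x <;> cases h4 : pvTemp x <;>
      simp_all [pvDemo, pvBio, pvGeo, pvTemp]

-- ===== VERDICT (by name: the statement is the Claim_ definition above) =====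
theorem categorize_risk_factors_py_spec : Claim_equal_categorize_risk_factors_py := by
  intro features _
  show categorize_risk_factors_py features = categorize_risk_factors_py_alt features
  simp only [categorize_risk_factors_py, categorize_risk_factors_py_alt, pvCategoriesB,
    foldA_eq, List.map_cons, List.map_nil]
  simp only [label_demo, label_bio, label_geo, label_temp, label_clin]
  simp
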